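-- pv_equiv track=rewrite | github.com/Nevir2002/Python-CodePTIT | PY01064.py | get
-- ===== SOURCE A (Python) =====
-- def get(n,k):
-- 	if n == 1: return 'A'
-- 	if n == 2:
-- 		if k == 1 or k == 3: return 'A'
-- 		else: return 'B'
-- 	if k > 2**(n-1): return get(n-1,k-2**(n-1))
-- 	if k == 2**(n-1): return chr(ord('A')+n-1)
-- 	if k < 2**(n-1): return get(n-1,k)
-- ===== SOURCE B (Python) =====
-- def get(n, k):
--     # Letter at position k of the level-n ruler word (length 2**n - 1):
--     # 'A' shifted by the number of times 2 divides k.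
--     if n < 1 or k < 1 or k > 2 ** n - 1:
--         raise ValueError("position out of range")
--     t = 0
--     while k % 2 == 0:
--         k //= 2
--         t += 1
--     return chr(ord('A') + t)
-- ===== Notes on version B (the rewrite author's own statement) =====
-- stated objective: faster
-- what changed: A recurses level by level over n (each call recomputing a big power 2**(n-1)); B validates the position and answers directly with a trailing-zero count of k ('A' + ctz(k)); Pre_ excludes positions outside [1, 2**n - 1], where A's uniform 'B' is an accidental fallthrough of its n==2 base case and B raises ValueError, and n outside [1, 9900], where A itself raises RecursionError.
-- outside the precondition, e.g. on get(3, 9): A returns 'B', B raises ValueError; on get(2, 0): A returns 'B', B raises ValueError; on get(5, -4): A returns 'B', B raises ValueError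
import Mathlib
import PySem

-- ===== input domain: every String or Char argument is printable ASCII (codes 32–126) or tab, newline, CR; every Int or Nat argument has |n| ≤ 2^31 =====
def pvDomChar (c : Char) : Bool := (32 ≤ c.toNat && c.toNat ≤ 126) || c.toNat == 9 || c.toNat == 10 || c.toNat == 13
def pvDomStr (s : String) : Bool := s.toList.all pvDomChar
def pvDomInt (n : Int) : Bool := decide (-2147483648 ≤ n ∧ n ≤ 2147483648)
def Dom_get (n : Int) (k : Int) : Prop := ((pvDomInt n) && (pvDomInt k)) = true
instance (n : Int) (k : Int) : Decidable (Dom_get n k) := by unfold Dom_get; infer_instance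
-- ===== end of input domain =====

-- B replaces A's level-by-level recursion over n by a direct answer: validate the position,
-- then count the trailing factors of 2 of k (the letter is 'A' + ctz k); measured faster.

-- ===== PORT A =====
-- Literal port of A's recursion on n.  For n ≤ 0 the Python recurses forever
-- (RecursionError, excluded by Pre_get); the port returns "B" on that unreachable branch.
-- chr(ord('A')+n-1) is ported as Char.ofNat (65 + (n-1).toNat), exact for the branch's
-- reachable arguments.
def get (n : Int) (k : Int) : String :=
  if n = 1 then "A"
  else if n = 2 then (if k = 1 ∨ k = 3 then "A" else "B")
  else if n ≤ 0 then "B"  -- Python diverges here; outside Pre_get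
  else
    let p : Int := 2 ^ (n - 1).toNat
    if p < k then get (n - 1) (k - p)
    else if k = p then String.ofList [Char.ofNat (65 + (n - 1).toNat)]
    else get (n - 1) k
termination_by n.toNat
decreasing_by all_goals omega

-- ===== PORT B =====
-- the while-loop of Source B: strip factors of 2 from k, counting them in t.
-- The 0 < k guard only makes the loop total (unreachable past Source B's range check).
def ctzLoop (k : Int) (t : Int) : Int :=
  if h : 0 < k ∧ PySem.Int.mod k 2 = 0 then
    ctzLoop (PySem.Int.floordiv k 2) (t + 1)
  else t
termination_by k.toNat
decreasing_by
  rw [PySem.Int.floordiv_eq_ediv_of_pos (by omega)]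
  rw [PySem.Int.mod_eq_emod_of_pos (by omega)] at h
  omega

def get_alt (n : Int) (k : Int) : String :=
  if n < 1 ∨ k < 1 ∨ 2 ^ n.toNat - 1 < k then ""  -- Python raises ValueError here; outside Pre_get
  else String.ofList [Char.ofNat (65 + (ctzLoop k 0).toNat)]

-- ===== PRECONDITION & SPEC =====
-- Pre_get excludes (i) n outside [1, 9900]: for n ≤ 0 A's recursion never terminates and for
-- n > 9900 its depth ≈ n exceeds the runner's recursion limit, so A raises RecursionError;
-- (ii) positions k outside [1, 2^n - 1] (the level-n word has length 2^n - 1): there A's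
-- uniform 'B' is an accidental fallthrough of its n == 2 base case and B raises ValueError.
def Pre_get (n : Int) (k : Int) : Prop :=
  1 ≤ n ∧ n ≤ 9900 ∧ 1 ≤ k ∧ k ≤ 2 ^ n.toNat - 1
instance (n : Int) (k : Int) : Decidable (Pre_get n k) := by unfold Pre_get; infer_instance
def pvWitness_get : Int × Int := (3, 5)
def Spec_get (n : Int) (k : Int) (out : String) : Prop := out = get_alt n k
instance (n : Int) (k : Int) (out : String) : Decidable (Spec_get n k out) := by unfold Spec_get; infer_instance

-- ===== CLAIM (what is proved, stated in full; the proofs are below) =====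
def Claim_equal_get : Prop := ∀ (n : Int) (k : Int), Dom_get n k → Pre_get n k → Spec_get n k (get n k)

-- ===== LEMMAS AND PROOFS =====

-- the loop's two step equations, with mod/floordiv turned into omega-friendly '/' and '%'
lemma ctzLoop_stop (k t : Int) (h : ¬(0 < k ∧ k % 2 = 0)) : ctzLoop k t = t := by
  have h' : ¬(0 < k ∧ PySem.Int.mod k 2 = 0) := by
    simpa only [PySem.Int.mod_eq_emod_of_pos (show (0:Int) < 2 by norm_num)] using h
  rw [ctzLoop, dif_neg h']

lemma ctzLoop_step (k t : Int) (h0 : 0 < k) (h2 : k % 2 = 0) :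
    ctzLoop k t = ctzLoop (k / 2) (t + 1) := by
  have h' : 0 < k ∧ PySem.Int.mod k 2 = 0 := by
    rw [PySem.Int.mod_eq_emod_of_pos (show (0:Int) < 2 by norm_num)]; exact ⟨h0, h2⟩
  rw [ctzLoop, dif_pos h', PySem.Int.floordiv_eq_ediv_of_pos (show (0:Int) < 2 by norm_num)]

lemma ctzLoop_pow (j : ℕ) : ∀ t : Int, ctzLoop ((2 : Int) ^ j) t = t + j := by
  induction j with
  | zero => intro t; rw [ctzLoop_stop] <;> norm_num
  | succ j ih =>
      intro t
      rw [show ((2:Int) ^ (j+1)) = 2 ^ j * 2 by ring,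
        ctzLoop_step _ _ (by positivity) (by omega),
        Int.mul_ediv_cancel _ (by norm_num), ih]
      push_cast; ring

lemma ctzLoop_add_pow (j : ℕ) : ∀ (m t : Int), 0 < m → m < 2 ^ j →
    ctzLoop ((2 : Int) ^ j + m) t = ctzLoop m t := by
  induction j with
  | zero => intro m t h1 h2; omega
  | succ j ih =>
      intro m t h1 h2
      by_cases he : m % 2 = 0
      · have hm2 : (2 : Int) ≤ m := by omega
        have hsum : ((2:Int) ^ (j+1) + m) % 2 = 0 := by
          rw [show ((2:Int) ^ (j+1)) = 2 ^ j * 2 by ring]; omega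
        rw [ctzLoop_step _ _ (by positivity) hsum, ctzLoop_step _ _ (by omega) he]
        have hdiv : ((2:Int) ^ (j+1) + m) / 2 = 2 ^ j + m / 2 := by
          rw [show ((2:Int) ^ (j+1)) = 2 ^ j * 2 by ring]; omega
        rw [hdiv]
        refine ih _ _ (by omega) ?_
        have : ((2:Int) ^ (j+1)) = 2 ^ j * 2 := by ring
        omega
      · have hsum : ¬(0 < (2:Int) ^ (j+1) + m ∧ ((2:Int) ^ (j+1) + m) % 2 = 0) := by
          have : ((2:Int) ^ (j+1)) = 2 ^ j * 2 := by ring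
          omega
        rw [ctzLoop_stop _ _ hsum, ctzLoop_stop _ _ (by omega)]

-- On valid positions A computes 'A' + ctz k, by strong induction on n
lemma get_eq_ctz : ∀ (N : ℕ) (n k : Int), n.toNat ≤ N → 1 ≤ n → 1 ≤ k →
    k ≤ 2 ^ n.toNat - 1 → get n k = String.ofList [Char.ofNat (65 + (ctzLoop k 0).toNat)] := by
  intro N
  induction N with
  | zero => intro n k hN h1; omega
  | succ N ih =>
      intro n k hN h1 hk1 hk2
      by_cases hn1 : n = 1
      · subst hn1
        have : k = 1 := by simp only [show (1:Int).toNat = 1 from rfl, pow_one] at hk2; omega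
        subst this
        rw [_root_.get.eq_def, ctzLoop_stop 1 0 (by omega)]
        simp
      by_cases hn2 : n = 2
      · subst hn2
        have hk4 : k ≤ 3 := by simpa using hk2
        rw [_root_.get.eq_def, if_neg (by norm_num), if_pos rfl]
        interval_cases k
        · rw [if_pos (Or.inl rfl), ctzLoop_stop 1 0 (by omega)]; decide
        · rw [if_neg (by omega), ctzLoop_step 2 0 (by norm_num) (by norm_num),
            show (2:Int)/2 = 1 by norm_num, show (0:Int)+1 = 1 by norm_num,
            ctzLoop_stop 1 1 (by omega)]
          decide
        · rw [if_pos (Or.inr rfl), ctzLoop_stop 3 0 (by omega)]; decide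
      -- n ≥ 3
      have hn3 : 3 ≤ n := by omega
      have hj : n.toNat = (n - 1).toNat + 1 := by omega
      have hpow : (2 : Int) ^ n.toNat = 2 ^ (n - 1).toNat * 2 := by rw [hj]; ring
      have hppos : (0 : Int) < 2 ^ (n - 1).toNat := by positivity
      rw [_root_.get.eq_def, if_neg hn1, if_neg hn2, if_neg (by omega)]
      set p : Int := 2 ^ (n - 1).toNat with hp
      by_cases hgt : p < k
      · rw [if_pos hgt, ih (n - 1) (k - p) (by omega) (by omega) (by omega) (by omega)]
        have := ctzLoop_add_pow (n - 1).toNat (k - p) 0 (by omega) (by omega)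
        rw [show p + (k - p) = k by ring] at this
        rw [this]
      · rw [if_neg hgt]
        by_cases heq : k = p
        · rw [if_pos heq, heq]
          rw [show p = (2:Int) ^ ((n-1).toNat) by rfl, ctzLoop_pow (n - 1).toNat 0]
          simp
        · rw [if_neg heq, ih (n - 1) k (by omega) (by omega) (by omega) (by omega)]

-- ===== VERDICT (by name: the statement is the Claim_ definition above) =====
theorem get_spec : Claim_equal_get := by
  intro n k _hd hpre
  obtain ⟨h1, _, hk1, hk2⟩ := hpre
  unfold Spec_get get_alt
  rw [if_neg (by push Not; exact ⟨by omega, by omega, by omega⟩)]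
  exact get_eq_ctz n.toNat n k le_rfl h1 hk1 hk2
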